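-- pv_equiv track=rewrite | github.com/guard1000/Everyday-coding | SDS_2-1.py | solution
-- ===== SOURCE A (Python) =====
-- import itertools
--
-- def solution(enem, mis):    #적 정보와 미사일 정보를 받아옴
--     answer=0
--     missile=[]
--     for i in range(len(mis)):   #missile변수에 미사일들 입력
--         for j in range(mis[i][1]):
--             missile.append(mis[i][0])
--
--     #불가능한 경우 -1 출력
--     missile = sorted(missile, reverse=True)
--     if sum(missile[:3]) < enem[0]*enem[1]:  #제일 큰 4개 합이 총 방어막보다 작으면 불가
--         return -1
--
--     # 가능한 경우
--     else:
--         one = [n for n in missile if n >= enem[1]]  #혼자서도 격파 가능한 미사일들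
--         two = [m for m in missile if m < enem[1]]   #혼자서 격파 불가능한 미사일들
--         c = itertools.combinations(two, 2)
--         two = [list(n) for n in c if n[0] + n[1] >= enem[1]]    #합이 방어막 이상인 2개조합 리스트
--         two = sorted(two, key=lambda a: sum(a))
--         two = two[:enem[0]]  #enem의 갯수개 만큼만 빼냄
--         two = [sum(n) for n in two] + one
--         two.sort()
--         for i in range(enem[0]):
--             answer = answer+two[i]
--         return answer
-- ===== SOURCE B (Python) =====
-- import itertools
--
-- def solution(enem, mis):
--     # Two-pointer over the descending weak list: only the k cheapest qualifying
--     # partners of each missile are ever generated (no enumeration of all pairs).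
--     k, shield = enem[0], enem[1]
--     arsenal = sorted((row[0] for row in mis for _ in range(row[1])), reverse=True)
--     if sum(arsenal[:3]) < k * shield:
--         return -1
--     if k <= 0:
--         return 0
--     strong = list(itertools.takewhile(lambda x: x >= shield, arsenal))
--     weak = arsenal[len(strong):]
--     m = len(weak)
--     sums = []
--     hi = m  # weak[0:hi] are exactly the partners >= shield - weak[i]; shrinks as i grows
--     for i in range(m):
--         need = shield - weak[i]
--         while hi > 0 and weak[hi - 1] < need:
--             hi -= 1
--         for j in range(max(i + 1, hi - k), hi):
--             sums.append(weak[i] + weak[j])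
--     sums.sort()
--     cands = sums[:k] + strong
--     cands.sort()
--     return sum(cands[:k])
-- ===== Notes on version B (the rewrite author's own statement) =====
-- stated objective: alternative
-- what changed: B never enumerates pairs: it sorts once descending, splits strong/weak with takewhile, and runs a two-pointer sweep over the weak list (the qualifying-partner boundary hi only shrinks as i grows) emitting at most k pair sums per missile - the k cheapest, taken by index slice - instead of A's itertools.combinations over all weak pairs followed by a key-sort of pair lists; it trades A's uniform pair enumeration for index arithmetic whose work is bounded per missile.
import Mathlib
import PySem

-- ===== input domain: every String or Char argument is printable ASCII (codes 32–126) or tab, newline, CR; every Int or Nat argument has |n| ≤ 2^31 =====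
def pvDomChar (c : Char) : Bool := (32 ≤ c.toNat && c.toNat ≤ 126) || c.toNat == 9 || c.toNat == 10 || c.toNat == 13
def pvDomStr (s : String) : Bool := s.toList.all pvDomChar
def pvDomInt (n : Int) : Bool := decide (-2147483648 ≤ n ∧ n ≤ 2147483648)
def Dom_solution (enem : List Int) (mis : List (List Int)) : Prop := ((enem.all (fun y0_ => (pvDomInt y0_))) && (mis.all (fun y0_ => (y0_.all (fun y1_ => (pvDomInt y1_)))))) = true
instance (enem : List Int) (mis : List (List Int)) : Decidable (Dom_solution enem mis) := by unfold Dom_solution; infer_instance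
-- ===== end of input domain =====

-- B replaces A's enumeration of every weak pair (itertools.combinations + a key-sort of pair
-- lists) by a two-pointer sweep over the descending weak list that emits, for each missile,
-- only its k cheapest qualifying partners; objective: alternative algorithm, same result.

-- ===== PORT A =====
-- literal port of A; 'list(n)' on a 2-tuple from itertools.combinations is the identity here
-- (PySem.List.combinations already yields lists); comprehensions are ported as filter/map.
def solution (enem : List Int) (mis : List (List Int)) : Int :=
  let missile : List Int :=
    (PySem.List.pyRange 0 (PySem.List.len mis) 1).foldl (fun acc i =>
      (PySem.List.pyRange 0 (PySem.List.pyGetD (PySem.List.pyGetD mis i []) 1 0) 1).foldl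
        (fun acc2 _ => acc2 ++ [PySem.List.pyGetD (PySem.List.pyGetD mis i []) 0 0]) acc) []
  let missile := PySem.List.sorted missile (fun x => x) true
  if (PySem.List.slice missile none (some 3)).sum <
      PySem.List.pyGetD enem 0 0 * PySem.List.pyGetD enem 1 0 then
    -1
  else
    let one := missile.filter (fun n => decide (PySem.List.pyGetD enem 1 0 ≤ n))
    let two := missile.filter (fun m => decide (m < PySem.List.pyGetD enem 1 0))
    let c := PySem.List.combinations two 2
    let two2 := c.filter (fun n =>
      decide (PySem.List.pyGetD enem 1 0 ≤ PySem.List.pyGetD n 0 0 + PySem.List.pyGetD n 1 0))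
    let two3 := PySem.List.sorted two2 (fun a => a.sum) false
    let two4 := PySem.List.slice two3 none (some (PySem.List.pyGetD enem 0 0))
    let two5 := (two4.map (fun n => n.sum)) ++ one
    let two6 := PySem.List.sorted two5 (fun x => x) false
    (PySem.List.pyRange 0 (PySem.List.pyGetD enem 0 0) 1).foldl
      (fun answer i => answer + PySem.List.pyGetD two6 i 0) 0

-- ===== PORT B =====
-- Source B's inner 'while hi > 0 and weak[hi-1] < need: hi -= 1'
def whileHi (w : List Int) (need : Int) : Nat → Nat
  | 0 => 0
  | h + 1 => if PySem.List.pyGetD w (h : Int) 0 < need then whileHi w need h else h + 1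

-- Source B's 'for i in range(m)' loop carrying the two-pointer hi and the sums accumulator
def iLoop (w : List Int) (sh k : Int) (i hi : Nat) (sums : List Int) : List Int :=
  if _h : i < w.length then
    let need := sh - PySem.List.pyGetD w (i : Int) 0
    let hi' := whileHi w need hi
    let sums' := (PySem.List.pyRange (max ((i : Int) + 1) ((hi' : Int) - k)) ((hi' : Int)) 1).foldl
      (fun a j => a ++ [PySem.List.pyGetD w (i : Int) 0 + PySem.List.pyGetD w j 0]) sums
    iLoop w sh k (i + 1) hi' sums'
  else sums
termination_by w.length - i

def solution_alt (enem : List Int) (mis : List (List Int)) : Int :=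
  let k := PySem.List.pyGetD enem 0 0
  let shield := PySem.List.pyGetD enem 1 0
  let arsenal := PySem.List.sorted
    (mis.flatMap (fun row => (PySem.List.pyRange 0 (PySem.List.pyGetD row 1 0) 1).map
      (fun _ => PySem.List.pyGetD row 0 0))) (fun x => x) true
  if (PySem.List.slice arsenal none (some 3)).sum < k * shield then -1
  else if k ≤ 0 then 0
  else
    let strong := arsenal.takeWhile (fun x => decide (shield ≤ x))
    let weak := PySem.List.slice arsenal (some (strong.length : Int)) none
    let sums := iLoop weak shield k 0 weak.length []
    let sums := PySem.List.sorted sums (fun x => x) false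
    let cands := PySem.List.slice sums none (some k) ++ strong
    let cands := PySem.List.sorted cands (fun x => x) false
    (PySem.List.slice cands none (some k)).sum

-- ===== PRECONDITION & SPEC =====
-- helper views of the input used only by Pre_ (independent of both ports)
def pvK (enem : List Int) : Int := PySem.List.pyGetD enem 0 0
def pvShield (enem : List Int) : Int := PySem.List.pyGetD enem 1 0
def pvMissiles (mis : List (List Int)) : List Int :=
  mis.foldl (fun acc row =>
    acc ++ List.replicate (PySem.List.pyGetD row 1 0).toNat (PySem.List.pyGetD row 0 0)) []
def pvSortedM (mis : List (List Int)) : List Int :=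
  PySem.List.sorted (pvMissiles mis) (fun x => x) true

-- Pre_ excludes exactly the inputs on which A raises an IndexError: enem or some missile row
-- shorter than 2, or (in the feasible branch with a positive enemy count) fewer destruction
-- candidates (single strong missiles plus qualifying weak pairs) than enemies.
def Pre_solution (enem : List Int) (mis : List (List Int)) : Prop :=
  2 ≤ enem.length ∧ (∀ row ∈ mis, 2 ≤ row.length) ∧
  (pvK enem ≤ 0 ∨
   ((pvSortedM mis).take 3).sum < pvK enem * pvShield enem ∨
   (pvK enem).toNat ≤
     (pvSortedM mis).countP (fun m => decide (pvShield enem ≤ m)) +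
     (PySem.List.combinations ((pvSortedM mis).filter (fun m => decide (m < pvShield enem))) 2).countP
       (fun c => decide (pvShield enem ≤ c.sum)))
instance (enem : List Int) (mis : List (List Int)) : Decidable (Pre_solution enem mis) := by
  unfold Pre_solution; infer_instance

def pvWitness_solution : List Int × List (List Int) := ([1, 5], [[6, 1]])

def Spec_solution (enem : List Int) (mis : List (List Int)) (out : Int) : Prop := out = solution_alt enem mis
instance (enem : List Int) (mis : List (List Int)) (out : Int) : Decidable (Spec_solution enem mis out) := by unfold Spec_solution; infer_instance

-- ===== CLAIM (what is proved, stated in full; the proofs are below) =====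
def Claim_equal_solution : Prop := ∀ (enem : List Int) (mis : List (List Int)), Dom_solution enem mis → Pre_solution enem mis → Spec_solution enem mis (solution enem mis)

-- ===== LEMMAS AND PROOFS =====

-- abbreviation used only by the proofs
def sortA (l : List Int) : List Int := PySem.List.sorted l (fun x => x) false

-- number of weak partners at least t (the value Source B's two-pointer hi converges to)
def cnt (w : List Int) (t : Int) : Nat := w.countP (fun y => decide (t ≤ y))

-- the slice of pair sums Source B emits for index i, and the part it skips
def rowT (w : List Int) (sh k : Int) (i : Nat) : List Int :=
  (PySem.List.pyRange (max ((i : Int) + 1) (((cnt w (sh - PySem.List.pyGetD w i 0) : Nat) : Int) - k))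
      ((cnt w (sh - PySem.List.pyGetD w i 0) : Nat) : Int) 1).map
    (fun j => PySem.List.pyGetD w (i : Int) 0 + PySem.List.pyGetD w j 0)
def rowRem (w : List Int) (sh k : Int) (i : Nat) : List Int :=
  (PySem.List.pyRange ((i : Int) + 1)
      (max ((i : Int) + 1) (((cnt w (sh - PySem.List.pyGetD w i 0) : Nat) : Int) - k)) 1).map
    (fun j => PySem.List.pyGetD w (i : Int) 0 + PySem.List.pyGetD w j 0)
def rowFull (w : List Int) (sh : Int) (i : Nat) : List Int :=
  (PySem.List.pyRange ((i : Int) + 1) ((cnt w (sh - PySem.List.pyGetD w i 0) : Nat) : Int) 1).map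
    (fun j => PySem.List.pyGetD w (i : Int) 0 + PySem.List.pyGetD w j 0)

def suffT (w : List Int) (sh k : Int) (i : Nat) : List Int :=
  if _h : i < w.length then rowT w sh k i ++ suffT w sh k (i + 1) else []
termination_by w.length - i
def suffFull (w : List Int) (sh : Int) (i : Nat) : List Int :=
  if _h : i < w.length then rowFull w sh i ++ suffFull w sh (i + 1) else []
termination_by w.length - i

-- structural reading of the qualifying pair sums of A's combinations pipeline
def pairsOf (sh : Int) : List Int → List Int
  | [] => []
  | x :: xs => ((xs.filter (fun y => decide (sh ≤ x + y))).map (fun y => x + y)) ++ pairsOf sh xs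

lemma dropWhile_head_false {p : Int → Bool} :
    ∀ {l : List Int} {x : Int} {xs : List Int}, List.dropWhile p l = x :: xs → p x = false := by
  intro l
  induction l with
  | nil => intro x xs h; simp [List.dropWhile] at h
  | cons a l ih =>
      intro x xs h
      rw [List.dropWhile_cons] at h
      by_cases hp : p a
      · simp [hp] at h; exact ih h
      · simp [hp] at h
        rw [← h.1]; simpa using hp

lemma sortA_pairwise (l : List Int) : (sortA l).Pairwise (· ≤ ·) := by
  simpa using PySem.List.sorted_pairwise (xs := l) (key := fun x : Int => x)

lemma sortA_perm (l : List Int) : (sortA l).Perm l :=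
  PySem.List.sorted_perm l (fun x => x) false

lemma sortA_congr_perm {l₁ l₂ : List Int} (h : l₁.Perm l₂) : sortA l₁ = sortA l₂ :=
  PySem.List.sorted_eq_sorted_of_perm l₁ l₂ (fun x => x) (fun _ _ h => h) h

lemma take_eq_replicate_of_pairwise (q : Int) :
    ∀ (d : List Int), d.Pairwise (· ≤ ·) → (∀ x ∈ d, q ≤ x) →
      ∀ n, n ≤ d.countP (fun x => decide (x ≤ q)) → d.take n = List.replicate n q := by
  intro d
  induction d with
  | nil =>
      intro _ _ n hn
      simp only [List.countP_nil, Nat.le_zero] at hn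
      simp [hn]
  | cons x xs ih =>
      intro hp hq n hn
      rcases List.pairwise_cons.mp hp with ⟨hx, hxs⟩
      cases n with
      | zero => simp
      | succ m =>
          by_cases hxq : x ≤ q
          · have hxq' : x = q := le_antisymm hxq (hq x (by simp))
            have hc : (x :: xs).countP (fun x => decide (x ≤ q))
                = xs.countP (fun x => decide (x ≤ q)) + 1 := by
              simp [hxq]
            have hm : m ≤ xs.countP (fun x => decide (x ≤ q)) := by omega
            have := ih hxs (fun y hy => hq y (by simp [hy])) m hm
            simp [this, List.replicate_succ, hxq']
          · exfalso
            have h0 : xs.countP (fun x => decide (x ≤ q)) = 0 := by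
              rw [List.countP_eq_zero]
              intro a ha
              simp only [decide_eq_true_eq]
              intro haq
              exact hxq (le_trans (hx a ha) haq)
            have : (x :: xs).countP (fun x => decide (x ≤ q)) = 0 := by
              simp [hxq, h0]
            omega

lemma takeSort_cons (K : Nat) (q : Int) (L : List Int)
    (h : K ≤ L.countP (fun x => decide (x ≤ q))) :
    (sortA (q :: L)).take K = (sortA L).take K := by
  set p : Int → Bool := fun x => decide (x < q) with hp
  set s := sortA L with hs
  have hsp : s.Pairwise (· ≤ ·) := sortA_pairwise L
  have hsperm : s.Perm L := sortA_perm L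
  set tw := s.takeWhile p with htw
  set dw := s.dropWhile p with hdw
  have htd : tw ++ dw = s := List.takeWhile_append_dropWhile
  -- all elements of dw are ≥ q
  have hdwge : ∀ y ∈ dw, q ≤ y := by
    rcases hdwe : dw with _ | ⟨d0, ds⟩
    · simp
    · have hd0 : p d0 = false := dropWhile_head_false (l := s) (by rw [← hdw]; exact hdwe)
      have hq0 : q ≤ d0 := by simpa [hp] using hd0
      have hpd : (d0 :: ds).Pairwise (· ≤ ·) := by
        rw [← hdwe, hdw]; exact List.Pairwise.sublist (List.dropWhile_sublist p) hsp
      intro y hy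
      rcases List.mem_cons.mp hy with rfl | hy'
      · exact hq0
      · exact le_trans hq0 ((List.pairwise_cons.mp hpd).1 y hy')
  have htwlt : ∀ y ∈ tw, y < q := by
    intro y hy
    have := List.mem_takeWhile_imp hy
    simpa [hp] using this
  -- sortA (q :: L) inserts q between tw and dw
  have hkey : sortA (q :: L) = tw ++ q :: dw := by
    apply PySem.List.sorted_id_eq_of_perm_of_pairwise
    · have h1 : (tw ++ q :: dw).Perm (q :: (tw ++ dw)) := List.perm_middle
      rw [htd] at h1
      exact h1.trans (hsperm.cons q)
    · rw [List.pairwise_append]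
      refine ⟨List.Pairwise.sublist (List.takeWhile_sublist p) hsp, ?_, ?_⟩
      · rw [List.pairwise_cons]
        exact ⟨hdwge, List.Pairwise.sublist (List.dropWhile_sublist p) hsp⟩
      · intro a ha b hb
        rcases List.mem_cons.mp hb with rfl | hb'
        · exact le_of_lt (htwlt a ha)
        · exact le_trans (le_of_lt (htwlt a ha)) (hdwge b hb')
  have hcnt : K ≤ s.countP (fun x => decide (x ≤ q)) := by
    rw [List.Perm.countP_eq _ hsperm]; exact h
  rw [hkey, ← htd]
  by_cases hK : K ≤ tw.length
  · rw [List.take_append, List.take_append]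
    have : K - tw.length = 0 := by omega
    simp [this]
  · rw [Nat.not_le] at hK
    rw [List.take_append, List.take_append, List.take_of_length_le (l := tw) (i := K) (by omega)]
    congr 1
    have hctw : tw.countP (fun x => decide (x ≤ q)) = tw.length := by
      rw [List.countP_eq_length]
      intro a ha
      simpa using le_of_lt (htwlt a ha)
    have hcdw : K - tw.length ≤ dw.countP (fun x => decide (x ≤ q)) := by
      have := List.countP_append (p := fun x => decide (x ≤ q)) (l₁ := tw) (l₂ := dw)
      rw [htd] at this
      omega
    have hdwp : dw.Pairwise (· ≤ ·) := List.Pairwise.sublist (List.dropWhile_sublist p) hsp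
    obtain ⟨n, hn⟩ : ∃ n, K - tw.length = n + 1 := ⟨K - tw.length - 1, by omega⟩
    rw [hn]
    have h2' : dw.take n = List.replicate n q :=
      take_eq_replicate_of_pairwise q dw hdwp hdwge n (by omega)
    have h1' : dw.take (n + 1) = List.replicate (n + 1) q :=
      take_eq_replicate_of_pairwise q dw hdwp hdwge (n + 1) (by omega)
    rw [h1', List.take_succ_cons, h2', List.replicate_succ]

lemma takeSort_dropR (K : Nat) (R L : List Int)
    (h : ∀ q ∈ R, K ≤ L.countP (fun x => decide (x ≤ q))) :
    (sortA (R ++ L)).take K = (sortA L).take K := by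
  induction R with
  | nil => simp
  | cons r R ih =>
      have h1 : K ≤ (R ++ L).countP (fun x => decide (x ≤ r)) := by
        have := List.countP_append (p := fun x => decide (x ≤ r)) (l₁ := R) (l₂ := L)
        have h2 := h r (by simp)
        omega
      calc (sortA ((r :: R) ++ L)).take K = (sortA (r :: (R ++ L))).take K := rfl
        _ = (sortA (R ++ L)).take K := takeSort_cons K r (R ++ L) h1
        _ = (sortA L).take K := ih (fun q hq => h q (by simp [hq]))

lemma takeSort_trunc (K : Nat) (L C : List Int) :
    (sortA ((sortA L).take K ++ C)).take K = (sortA (L ++ C)).take K := by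
  set s := sortA L with hs
  have hsp : s.Pairwise (· ≤ ·) := sortA_pairwise L
  have hsperm : s.Perm L := sortA_perm L
  by_cases hK : s.length ≤ K
  · rw [List.take_of_length_le hK]
    congr 1
    exact sortA_congr_perm (hsperm.append_right C)
  · rw [Nat.not_le] at hK
    have hsplit : s = s.take K ++ s.drop K := (List.take_append_drop K s).symm
    have hperm : (L ++ C).Perm (s.drop K ++ (s.take K ++ C)) := by
      have h1 : (L ++ C).Perm (s ++ C) := (hsperm.symm).append_right C
      have h2 : s ++ C = s.take K ++ (s.drop K ++ C) := by
        conv_lhs => rw [hsplit]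
        rw [List.append_assoc]
      rw [h2] at h1
      exact h1.trans (List.perm_append_comm_assoc _ _ _)
    rw [sortA_congr_perm hperm]
    refine (takeSort_dropR K (s.drop K) (s.take K ++ C) ?_).symm
    intro qq hq
    have hlen : (s.take K).length = K := by simp [List.length_take]; omega
    have hall : ∀ a ∈ s.take K, a ≤ qq := by
      intro a ha
      have hps := hsp
      rw [hsplit, List.pairwise_append] at hps
      exact hps.2.2 a ha qq hq
    have hct : (s.take K).countP (fun x => decide (x ≤ qq)) = (s.take K).length := by
      rw [List.countP_eq_length]; intro a ha; simpa using hall a ha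
    have hca := List.countP_append (p := fun x => decide (x ≤ qq)) (l₁ := s.take K) (l₂ := C)
    omega

lemma filter_ge_eq_takeWhile (t : Int) :
    ∀ (l : List Int), l.Pairwise (fun a b => b ≤ a) →
      l.filter (fun x => decide (t ≤ x)) = l.takeWhile (fun x => decide (t ≤ x)) := by
  intro l
  induction l with
  | nil => intro _; rfl
  | cons x xs ih =>
      intro hl
      rcases List.pairwise_cons.mp hl with ⟨hx, hxs⟩
      by_cases h : t ≤ x
      · simp only [List.filter_cons, List.takeWhile_cons]
        simp [h, ih hxs]
      · simp only [List.filter_cons, List.takeWhile_cons]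
        simp only [h, decide_false, Bool.false_eq_true, if_false]
        rw [List.filter_eq_nil_iff.mpr]
        intro a ha
        simp only [decide_eq_true_eq]
        intro hta
        exact h (le_trans hta (hx a ha))

lemma filter_lt_eq_dropWhile (t : Int) :
    ∀ (l : List Int), l.Pairwise (fun a b => b ≤ a) →
      l.filter (fun x => decide (x < t)) = l.dropWhile (fun x => decide (t ≤ x)) := by
  intro l
  induction l with
  | nil => intro _; rfl
  | cons x xs ih =>
      intro hl
      rcases List.pairwise_cons.mp hl with ⟨hx, hxs⟩
      by_cases h : t ≤ x
      · simp only [List.filter_cons, List.dropWhile_cons]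
        have : ¬ (x < t) := not_lt.mpr h
        simp [h, this, ih hxs]
      · simp only [List.filter_cons, List.dropWhile_cons]
        have hxlt : x < t := not_le.mp h
        simp only [h, decide_false, Bool.false_eq_true, if_false, hxlt, decide_true, if_true]
        rw [List.filter_eq_self.mpr]
        intro a ha
        simp only [decide_eq_true_eq]
        exact lt_of_le_of_lt (hx a ha) hxlt

lemma filter_ge_eq_take_cnt (t : Int) (l : List Int) (hd : l.Pairwise (fun a b => b ≤ a)) :
    l.filter (fun x => decide (t ≤ x)) = l.take (cnt l t) := by
  have h1 := filter_ge_eq_takeWhile t l hd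
  have h2 : (l.takeWhile (fun x => decide (t ≤ x))).length = cnt l t := by
    rw [cnt, List.countP_eq_length_filter, h1]
  rw [h1, ← h2]
  exact List.prefix_iff_eq_take.mp (List.takeWhile_prefix _)

lemma drop_cnt_eq_dropWhile (t : Int) (l : List Int) (hd : l.Pairwise (fun a b => b ≤ a)) :
    l.drop (cnt l t) = l.dropWhile (fun x => decide (t ≤ x)) := by
  have h2 : (l.takeWhile (fun x => decide (t ≤ x))).length = cnt l t := by
    rw [cnt, List.countP_eq_length_filter, filter_ge_eq_takeWhile t l hd]
  have h3 := List.drop_left (l₁ := l.takeWhile (fun x => decide (t ≤ x)))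
    (l₂ := l.dropWhile (fun x => decide (t ≤ x)))
  rw [List.takeWhile_append_dropWhile, h2] at h3
  exact h3

lemma cnt_le_length (l : List Int) (t : Int) : cnt l t ≤ l.length := List.countP_le_length

-- w[j'] monotone: j ≤ j' → w[j'] ≤ w[j] in a descending list

lemma getElem_ge_of_lt_cnt (t : Int) (l : List Int) (hd : l.Pairwise (fun a b => b ≤ a))
    {j : Nat} (hj : j < cnt l t) (hl : j < l.length) : t ≤ l[j] := by
  have hf := filter_ge_eq_take_cnt t l hd
  have hj' : j < (l.take (cnt l t)).length := by
    simp only [List.length_take]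
    omega
  have hmem : l[j] ∈ l.filter (fun x => decide (t ≤ x)) := by
    rw [hf]
    have hjt : (l.take (cnt l t))[j] = l[j] := List.getElem_take
    rw [← hjt]
    exact List.getElem_mem hj'
  simpa using (List.mem_filter.mp hmem).2

lemma getElem_lt_of_cnt_le (t : Int) (l : List Int) (hd : l.Pairwise (fun a b => b ≤ a))
    {j : Nat} (hj : cnt l t ≤ j) (hl : j < l.length) : l[j] < t := by
  have hj2 : j - cnt l t < (l.drop (cnt l t)).length := by
    simp only [List.length_drop]
    omega
  have hmem : l[j] ∈ l.filter (fun x => decide (x < t)) := by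
    rw [filter_lt_eq_dropWhile t l hd, ← drop_cnt_eq_dropWhile t l hd]
    have he : (l.drop (cnt l t))[j - cnt l t] = l[j] := by
      rw [List.getElem_drop]
      congr 1
      omega
    rw [← he]
    exact List.getElem_mem hj2
  simpa using (List.mem_filter.mp hmem).2

lemma cnt_antitone (l : List Int) {t t' : Int} (h : t ≤ t') : cnt l t' ≤ cnt l t := by
  apply List.countP_mono_left
  intro x _ hx
  simp only [decide_eq_true_eq] at hx ⊢
  omega

lemma whileHi_eq (l : List Int) (t : Int) (hd : l.Pairwise (fun a b => b ≤ a)) :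
    ∀ hi, cnt l t ≤ hi → hi ≤ l.length → whileHi l t hi = cnt l t := by
  intro hi
  induction hi with
  | zero => intro h1 _; simp only [whileHi]; omega
  | succ h ih =>
      intro h1 h2
      have hhl : h < l.length := by omega
      have hget : PySem.List.pyGetD l (h : Int) 0 = l[h] := by
        rw [PySem.List.pyGetD_eq_getElem l 0 (by positivity) (by exact_mod_cast hhl)]
        simp
      by_cases hc : cnt l t ≤ h
      · have hlt : l[h] < t := getElem_lt_of_cnt_le t l hd hc hhl
        simp only [whileHi, hget, hlt, if_true]
        exact ih hc (by omega)
      · have hcnt : cnt l t = h + 1 := by omega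
        have hge : t ≤ l[h] := getElem_ge_of_lt_cnt t l hd (by omega) hhl
        simp only [whileHi, hget, not_lt.mpr hge, if_false]
        omega

lemma map_pyRange_getD (l : List Int) (d : Int) :
    ∀ (b a : Nat), b ≤ l.length →
      (PySem.List.pyRange (a : Int) (b : Int) 1).map (fun j => PySem.List.pyGetD l j d)
        = (l.drop a).take (b - a) := by
  intro b
  induction b with
  | zero =>
      intro a _
      rw [PySem.List.pyRange_one_eq_nil (by positivity)]
      simp
  | succ b ih =>
      intro a hb
      by_cases hab : a ≤ b
      · have hcast : ((b + 1 : Nat) : Int) = (b : Int) + 1 := by push_cast; ring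
        rw [hcast, PySem.List.pyRange_one_succ_right (by exact_mod_cast hab), List.map_append,
          ih a (by omega)]
        have hbl : b < l.length := by omega
        have hgb : PySem.List.pyGetD l (b : Int) d = l[b] := by
          rw [PySem.List.pyGetD_eq_getElem l d (by positivity) (by exact_mod_cast hbl)]
          simp
        have hba : b - a < (l.drop a).length := by simp [List.length_drop]; omega
        have htake : (l.drop a).take (b + 1 - a) = (l.drop a).take (b - a) ++ [(l.drop a)[b - a]] := by
          have : b + 1 - a = (b - a) + 1 := by omega
          rw [this, List.take_add_one, List.getElem?_eq_getElem hba]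
          rfl
        rw [htake]
        simp only [List.map_cons, List.map_nil, hgb]
        congr 2
        rw [List.getElem_drop]
        congr 1
        omega
      · rw [PySem.List.pyRange_one_eq_nil (by exact_mod_cast (by omega : (b+1 : Nat) ≤ a))]
        have : b + 1 - a = 0 := by omega
        simp [this]

lemma desc_getElem_mono (w : List Int) (hd : w.Pairwise (fun a b => b ≤ a))
    {p q : Nat} (hpq : p ≤ q) (hq : q < w.length) : w[q] ≤ w[p] := by
  rcases Nat.lt_or_ge p q with h | h
  · exact (List.pairwise_iff_getElem.mp hd) p q (by omega) hq h
  · have : p = q := by omega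
    subst this
    exact le_refl _

lemma rowFull_decomp (w : List Int) (sh k : Int) (hk : 0 < k) (i : Nat) :
    rowFull w sh i = rowRem w sh k i ++ rowT w sh k i := by
  unfold rowFull rowRem rowT
  set c : Int := ((cnt w (sh - PySem.List.pyGetD w i 0) : Nat) : Int) with hc
  by_cases hci : (i : Int) + 1 ≤ c - k
  · have h1 : (i : Int) + 1 ≤ max ((i : Int) + 1) (c - k) := le_max_left _ _
    have h2 : max ((i : Int) + 1) (c - k) ≤ c := by
      rw [max_le_iff]
      constructor <;> omega
    rw [← List.map_append, ← PySem.List.pyRange_one_append _ _ _ h1 h2]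
  · have hmax : max ((i : Int) + 1) (c - k) = (i : Int) + 1 := by
      rw [max_eq_left]
      omega
    rw [hmax, PySem.List.pyRange_one_eq_nil (le_refl _)]
    simp

lemma rowT_count (w : List Int) (sh k : Int) (hk : 0 < k)
    (hd : w.Pairwise (fun a b => b ≤ a)) (i : Nat)
    {q : Int} (hq : q ∈ rowRem w sh k i) :
    k.toNat ≤ (rowT w sh k i).countP (fun z => decide (z ≤ q)) := by
  unfold rowRem at hq
  rcases List.mem_map.mp hq with ⟨j', hj', hfj⟩
  have hfj' : PySem.List.pyGetD w (i : Int) 0 + PySem.List.pyGetD w j' 0 = q := hfj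
  rw [PySem.List.mem_pyRange_one] at hj'
  set t : Int := sh - PySem.List.pyGetD w i 0 with ht
  set c : Int := ((cnt w t : Nat) : Int) with hc
  have hlo : (i : Int) + 1 < max ((i : Int) + 1) (c - k) := by omega
  have hmax : max ((i : Int) + 1) (c - k) = c - k := by
    rcases max_choice ((i : Int) + 1) (c - k) with h | h
    · omega
    · exact h
  have hck : (i : Int) + 1 < c - k := by omega
  have hcl : cnt w t ≤ w.length := cnt_le_length w t
  -- every element of rowT is ≤ q
  have hall : ∀ z ∈ rowT w sh k i, z ≤ q := by
    intro z hz
    unfold rowT at hz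
    rcases List.mem_map.mp hz with ⟨j, hj, rfl⟩
    rw [PySem.List.mem_pyRange_one] at hj
    rw [← ht, ← hc] at hj
    have hj0 : (0 : Int) ≤ j := by omega
    have hj'0 : (0 : Int) ≤ j' := by omega
    have hjl : j.toNat < w.length := by omega
    have hj'l : j'.toNat < w.length := by omega
    have hgj : PySem.List.pyGetD w j 0 = w[j.toNat] :=
      PySem.List.pyGetD_eq_getElem w 0 hj0 (by omega)
    have hgj' : PySem.List.pyGetD w j' 0 = w[j'.toNat] :=
      PySem.List.pyGetD_eq_getElem w 0 hj'0 (by omega)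
    have hmono : w[j.toNat] ≤ w[j'.toNat] := by
      apply desc_getElem_mono w hd _ hjl
      omega
    rw [hgj]
    rw [hgj'] at hfj'
    omega
  have hlen : (rowT w sh k i).length = k.toNat := by
    unfold rowT
    rw [List.length_map, PySem.List.length_pyRange_one, ← ht, ← hc, hmax]
    omega
  have : (rowT w sh k i).countP (fun z => decide (z ≤ q)) = (rowT w sh k i).length := by
    rw [List.countP_eq_length]
    intro a ha
    simpa using hall a ha
  omega

lemma master (w : List Int) (sh k : Int) (hk : 0 < k)
    (hd : w.Pairwise (fun a b => b ≤ a)) :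
    ∀ i C, (sortA (suffFull w sh i ++ C)).take k.toNat
        = (sortA (suffT w sh k i ++ C)).take k.toNat := by
  intro i
  induction hn : w.length - i generalizing i with
  | zero =>
      intro C
      have hi : ¬ i < w.length := by omega
      rw [suffFull, suffT]
      simp [hi]
  | succ n ih =>
      intro C
      have hi : i < w.length := by omega
      have hsf : suffFull w sh i = rowFull w sh i ++ suffFull w sh (i + 1) := by
        rw [suffFull]
        simp [hi]
      have hst : suffT w sh k i = rowT w sh k i ++ suffT w sh k (i + 1) := by
        rw [suffT]
        simp [hi]
      rw [hsf, hst, List.append_assoc, List.append_assoc]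
      calc (sortA (rowFull w sh i ++ (suffFull w sh (i + 1) ++ C))).take k.toNat
          = (sortA (suffFull w sh (i + 1) ++ (rowFull w sh i ++ C))).take k.toNat := by
            rw [sortA_congr_perm (List.perm_append_comm_assoc _ _ _)]
        _ = (sortA (suffT w sh k (i + 1) ++ (rowFull w sh i ++ C))).take k.toNat :=
            ih (i + 1) (by omega) _
        _ = (sortA (rowFull w sh i ++ (suffT w sh k (i + 1) ++ C))).take k.toNat := by
            rw [sortA_congr_perm (List.perm_append_comm_assoc _ _ _)]
        _ = (sortA (rowRem w sh k i ++ (rowT w sh k i ++ (suffT w sh k (i + 1) ++ C)))).take k.toNat := by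
            rw [rowFull_decomp w sh k hk i, List.append_assoc]
        _ = (sortA (rowT w sh k i ++ (suffT w sh k (i + 1) ++ C))).take k.toNat := by
            apply takeSort_dropR
            intro q hq
            have h1 := rowT_count w sh k hk hd i hq
            have h2 := List.countP_append (p := fun z => decide (z ≤ q))
              (l₁ := rowT w sh k i) (l₂ := suffT w sh k (i + 1) ++ C)
            omega

lemma iLoop_eq (w : List Int) (sh k : Int) (hd : w.Pairwise (fun a b => b ≤ a)) :
    ∀ i hi sums, hi ≤ w.length →
      (i < w.length → cnt w (sh - PySem.List.pyGetD w i 0) ≤ hi) →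
      iLoop w sh k i hi sums = sums ++ suffT w sh k i := by
  intro i
  induction hn : w.length - i generalizing i with
  | zero =>
      intro hi sums _ _
      have h : ¬ i < w.length := by omega
      rw [iLoop, suffT]
      simp [h]
  | succ n ih =>
      intro hi sums hhi hcnt
      have h : i < w.length := by omega
      rw [iLoop]
      simp only [h, dif_pos]
      set t : Int := sh - PySem.List.pyGetD w (i : Int) 0 with ht
      have hwh : whileHi w t hi = cnt w t := whileHi_eq w t hd hi (hcnt h) hhi
      rw [hwh, PySem.List.foldl_append_singleton_eq_map]
      have hrow : (PySem.List.pyRange (max ((i : Int) + 1) (((cnt w t : Nat) : Int) - k))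
          ((cnt w t : Nat) : Int) 1).map
          (fun j => PySem.List.pyGetD w (i : Int) 0 + PySem.List.pyGetD w j 0) = rowT w sh k i := by
        unfold rowT
        rw [← ht]
      rw [hrow]
      have hnext : (i + 1 < w.length → cnt w (sh - PySem.List.pyGetD w (i + 1 : Nat) 0) ≤ cnt w t) := by
        intro h1
        apply cnt_antitone
        have hii : w[(i+1 : Nat)] ≤ w[i] := desc_getElem_mono w hd (by omega) h1
        have hg1 : PySem.List.pyGetD w ((i : Nat) : Int) 0 = w[i] :=
          PySem.List.pyGetD_eq_getElem w 0 (by positivity) (by exact_mod_cast h)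
        have hg2 : PySem.List.pyGetD w (((i + 1 : Nat)) : Int) 0 = w[(i+1 : Nat)] :=
          PySem.List.pyGetD_eq_getElem w 0 (by positivity) (by exact_mod_cast h1)
        rw [ht, hg1, hg2]
        omega
      rw [ih (i + 1) (by omega) (cnt w t) (sums ++ rowT w sh k i) (cnt_le_length w t) hnext]
      have hst : suffT w sh k i = rowT w sh k i ++ suffT w sh k (i + 1) := by
        rw [suffT]
        simp [h]
      rw [hst, List.append_assoc]

lemma pairsOf_suffFull (w : List Int) (sh : Int) (hd : w.Pairwise (fun a b => b ≤ a)) :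
    ∀ i, pairsOf sh (w.drop i) = suffFull w sh i := by
  intro i
  induction hn : w.length - i generalizing i with
  | zero =>
      have h : ¬ i < w.length := by omega
      rw [List.drop_eq_nil_of_le (by omega), suffFull]
      simp [h, pairsOf]
  | succ n ih =>
      have h : i < w.length := by omega
      rw [List.drop_eq_getElem_cons h]
      show (((w.drop (i+1)).filter (fun y => decide (sh ≤ w[i] + y))).map (fun y => w[i] + y)) ++
        pairsOf sh (w.drop (i+1)) = suffFull w sh i
      rw [ih (i+1) (by omega)]
      have hsf : suffFull w sh i = rowFull w sh i ++ suffFull w sh (i + 1) := by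
        rw [suffFull]
        simp [h]
      rw [hsf]
      congr 1
      -- row equality
      set t : Int := sh - PySem.List.pyGetD w i 0 with ht
      have hg : PySem.List.pyGetD w (i : Int) 0 = w[i] :=
        PySem.List.pyGetD_eq_getElem w 0 (by positivity) (by exact_mod_cast h)
      have hdrop : (w.drop (i+1)).Pairwise (fun a b => b ≤ a) :=
        List.Pairwise.sublist (List.drop_sublist _ _) hd
      -- predicate alignment
      have hpred : (w.drop (i+1)).filter (fun y => decide (sh ≤ w[i] + y))
          = (w.drop (i+1)).filter (fun y => decide (t ≤ y)) := by
        apply List.filter_congr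
        intro y _
        simp only [decide_eq_decide]
        rw [ht, hg]
        omega
      rw [hpred, filter_ge_eq_take_cnt t _ hdrop]
      -- cnt of the suffix
      have hcnt_split : cnt w t = (w.take (i+1)).countP (fun y => decide (t ≤ y))
          + cnt (w.drop (i+1)) t := by
        rw [cnt, cnt, ← List.countP_append, List.take_append_drop]
      by_cases hge : i + 1 ≤ cnt w t
      · have htake : (w.take (i+1)).countP (fun y => decide (t ≤ y)) = i + 1 := by
          have hall : ∀ a ∈ w.take (i+1), decide (t ≤ a) = true := by
            intro a ha
            obtain ⟨j, hj, rfl⟩ := List.getElem_of_mem ha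
            have hjlen : j < i + 1 := by
              have h2 := hj
              simp only [List.length_take] at h2
              omega
            rw [List.getElem_take]
            simp only [decide_eq_true_eq]
            exact getElem_ge_of_lt_cnt t w hd (by omega) (by omega)
          have := List.countP_eq_length.mpr hall
          rw [this, List.length_take]
          omega
        have hsufcnt : cnt (w.drop (i+1)) t = cnt w t - (i+1) := by omega
        rw [hsufcnt]
        -- rowFull as a slice
        unfold rowFull
        rw [← ht]
        have hcast : ((i : Int) + 1) = (((i + 1 : Nat)) : Int) := by push_cast; ring
        rw [hcast]
        have hr := map_pyRange_getD w 0 (cnt w t) (i+1) (cnt_le_length w t)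
        have hmm : (PySem.List.pyRange (((i + 1 : Nat)) : Int) ((cnt w t : Nat) : Int) 1).map
            (fun j => PySem.List.pyGetD w (i : Int) 0 + PySem.List.pyGetD w j 0)
            = ((PySem.List.pyRange (((i + 1 : Nat)) : Int) ((cnt w t : Nat) : Int) 1).map
              (fun j => PySem.List.pyGetD w j 0)).map (fun v => PySem.List.pyGetD w (i : Int) 0 + v) := by
          rw [List.map_map]
          rfl
        rw [hmm, hr]
        apply List.map_congr_left
        intro a _
        simp [hg]
      · have hlt : cnt w t < i + 1 := by omega
        have hzero : cnt (w.drop (i+1)) t = 0 := by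
          rw [cnt, List.countP_eq_zero]
          intro a ha
          rw [List.mem_iff_getElem] at ha
          rcases ha with ⟨j, hj, rfl⟩
          simp only [decide_eq_true_eq, not_le]
          have hjl : i + 1 + j < w.length := by
            simp only [List.length_drop] at hj
            omega
          rw [List.getElem_drop]
          exact getElem_lt_of_cnt_le t w hd (by omega) hjl
        rw [hzero]
        simp only [List.take_zero, List.map_nil]
        unfold rowFull
        rw [← ht, PySem.List.pyRange_one_eq_nil (by omega)]
        simp

-- ---------- A-side lemmas (combinations pipeline) ----------

lemma pairs_combinations (sh : Int) : ∀ ws : List Int,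
    ((PySem.List.combinations ws 2).filter (fun n =>
        decide (sh ≤ PySem.List.pyGetD n 0 0 + PySem.List.pyGetD n 1 0))).map (fun n => n.sum)
      = pairsOf sh ws := by
  intro ws
  induction ws with
  | nil => rfl
  | cons x xs ih =>
      have hc : PySem.List.combinations (x :: xs) 2
          = (PySem.List.combinations xs 1).map (fun c => x :: c) ++ PySem.List.combinations xs 2 :=
        PySem.List.combinations_cons_succ x xs 1
      rw [hc, PySem.List.combinations_one, List.map_map, List.filter_append, List.map_append, ih,
        List.filter_map, List.map_map]
      simp only [pairsOf]
      congr 1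
      simp [Function.comp_def, pysem]

lemma sorted_key_sum (L : List (List Int)) :
    (PySem.List.sorted L (fun a => a.sum) false).map (fun n => n.sum)
      = PySem.List.sorted (L.map (fun n => n.sum)) (fun x => x) false := by
  apply PySem.List.eq_of_perm_of_pairwise_le
  · exact ((PySem.List.sorted_perm (xs := L) (key := fun a => a.sum) (rev := false)).map _).trans
      (PySem.List.sorted_perm (xs := L.map (fun n => n.sum)) (key := fun x => x)
        (rev := false)).symm
  · exact PySem.List.sorted_map_key_pairwise (xs := L) (key := fun a => a.sum)
  · simpa using PySem.List.sorted_pairwise (xs := L.map (fun n => n.sum)) (key := fun x => x)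

lemma cond_on_combinations (sh : Int) (ws : List Int) :
    (PySem.List.combinations ws 2).filter (fun n =>
        decide (sh ≤ PySem.List.pyGetD n 0 0 + PySem.List.pyGetD n 1 0))
      = (PySem.List.combinations ws 2).filter (fun c => decide (sh ≤ c.sum)) := by
  apply List.filter_congr
  intro c hc
  have hl : c.length = 2 := PySem.List.length_of_mem_combinations hc
  rcases c with _ | ⟨a, _ | ⟨b, _ | ⟨x3, t⟩⟩⟩
  · simp at hl
  · simp at hl
  · simp [pysem]
  · simp at hl

lemma sum_loop (l : List Int) (k : Int) (hk : 0 < k) (hlen : k ≤ (l.length : Int)) :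
    (PySem.List.pyRange 0 k 1).foldl (fun acc i => acc + PySem.List.pyGetD l i 0) 0
      = (l.take k.toNat).sum := by
  have hcong : ∀ (acc : Int) (i : Int), i ∈ PySem.List.pyRange 0 k 1 →
      acc + PySem.List.pyGetD l i 0 = acc + PySem.List.pyGetD (l.take k.toNat) i 0 := by
    intro acc i hi
    rw [PySem.List.mem_pyRange_one] at hi
    have h2 : i.toNat < l.length := by omega
    have h4 : i < ((l.take k.toNat).length : Int) := by
      rw [List.length_take]; push_cast; omega
    rw [PySem.List.pyGetD_eq_getElem l (0 : Int) hi.1 (by omega),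
      PySem.List.pyGetD_eq_getElem (l.take k.toNat) (0 : Int) hi.1 h4]
    simp [List.getElem_take]
  rw [PySem.List.foldl_congr_mem (PySem.List.pyRange 0 k)
    (fun (acc : Int) i => acc + PySem.List.pyGetD l i 0)
    (fun (acc : Int) i => acc + PySem.List.pyGetD (l.take k.toNat) i 0) 0 hcong]
  set t := l.take k.toNat with ht
  have hlt : (t.length : Int) = k := by
    simp only [ht, List.length_take]; omega
  rw [← hlt, PySem.List.foldl_pyRange_zero_pyGetD' t (0 : Int) (fun acc v => acc + v) (0 : Int),
    List.sum_eq_foldl]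

-- ---------- both ports expand the same flat missile list ----------

lemma missileA (mis : List (List Int)) :
    (PySem.List.pyRange 0 (PySem.List.len mis) 1).foldl (fun acc i =>
      (PySem.List.pyRange 0 (PySem.List.pyGetD (PySem.List.pyGetD mis i []) 1 0) 1).foldl
        (fun acc2 _ => acc2 ++ [PySem.List.pyGetD (PySem.List.pyGetD mis i []) 0 0]) acc) []
      = pvMissiles mis := by
  rw [PySem.List.foldl_pyRange_zero_pyGetD mis ([] : List Int)
    (fun acc row => (PySem.List.pyRange 0 (PySem.List.pyGetD row 1 0) 1).foldl
      (fun acc2 _ => acc2 ++ [PySem.List.pyGetD row 0 0]) acc) ([] : List Int)]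
  unfold pvMissiles
  apply PySem.List.foldl_congr_mem
  intro acc row _
  rw [PySem.List.foldl_append_singleton_eq_map]
  congr 1
  simp [List.map_const', PySem.List.length_pyRange_one]

lemma missileB (mis : List (List Int)) :
    mis.flatMap (fun row => (PySem.List.pyRange 0 (PySem.List.pyGetD row 1 0) 1).map
      (fun _ => PySem.List.pyGetD row 0 0))
      = pvMissiles mis := by
  have h := PySem.List.foldl_append_eq_flatMap
    (g := fun row : List Int => (PySem.List.pyRange 0 (PySem.List.pyGetD row 1 0) 1).map
      (fun _ => PySem.List.pyGetD row 0 0)) (l := mis) (acc := [])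
  rw [List.nil_append] at h
  rw [← h]
  unfold pvMissiles
  apply PySem.List.foldl_congr_mem
  intro acc row _
  congr 1
  rw [List.map_const']
  rw [PySem.List.length_pyRange_one]
  congr 1
  omega

lemma main_eq (enem : List Int) (mis : List (List Int)) (hpre : Pre_solution enem mis) :
    solution enem mis = solution_alt enem mis := by
  obtain ⟨-, -, hdisj⟩ := hpre
  unfold pvK pvShield pvSortedM at hdisj
  unfold solution solution_alt
  simp only [missileA, missileB]
  set sh := PySem.List.pyGetD enem 1 0 with hsh
  set k := PySem.List.pyGetD enem 0 0 with hk
  set M := PySem.List.sorted (pvMissiles mis) (fun x => x) true with hM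
  by_cases hc : (PySem.List.slice M none (some 3)).sum < k * sh
  · simp only [if_pos hc]
  · simp only [if_neg hc]
    by_cases hk0 : k ≤ 0
    · rw [if_pos hk0, PySem.List.pyRange_one_eq_nil hk0, List.foldl_nil]
    · rw [if_neg hk0]
      have hk0' : 0 < k := not_le.mp hk0
      have hdesc : M.Pairwise (fun a b => b ≤ a) := by
        rw [hM]
        exact PySem.List.sorted_pairwise_rev (pvMissiles mis) (fun x => x)
      set one := M.filter (fun n => decide (sh ≤ n)) with hone
      set two := M.filter (fun m => decide (m < sh)) with htwo
      set K := k.toNat with hK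
      -- B's strong is A's one
      have hstrong : M.takeWhile (fun x => decide (sh ≤ x)) = one :=
        (filter_ge_eq_takeWhile sh M hdesc).symm
      -- B's weak is A's two
      have hweak : PySem.List.slice M (some (((M.takeWhile (fun x => decide (sh ≤ x))).length : Nat) : Int)) none = two := by
        rw [PySem.List.slice_from_natCast]
        have h1 := List.drop_left (l₁ := M.takeWhile (fun x => decide (sh ≤ x)))
          (l₂ := M.dropWhile (fun x => decide (sh ≤ x)))
        rw [List.takeWhile_append_dropWhile] at h1
        rw [h1, ← filter_lt_eq_dropWhile sh M hdesc]
      have htwodesc : two.Pairwise (fun a b => b ≤ a) :=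
        List.Pairwise.sublist (List.filter_sublist) hdesc
      -- B's sums are the truncated rows
      have hsums : iLoop two sh k 0 two.length [] = suffT two sh k 0 := by
        rw [iLoop_eq two sh k htwodesc 0 two.length [] (le_refl _)
          (fun _ => cnt_le_length two _), List.nil_append]
      -- fold sorted-id into sortA
      have fold : ∀ X : List Int, PySem.List.sorted X (fun x => x) false = sortA X := fun _ => rfl
      rw [hweak, hstrong, hsums]
      rw [PySem.List.slice_to _ (le_of_lt hk0'), PySem.List.slice_to _ (le_of_lt hk0'),
        PySem.List.slice_to _ (le_of_lt hk0')]
      rw [List.map_take, sorted_key_sum, pairs_combinations]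
      simp only [fold]
      rw [← hK]
      have hP0 : pairsOf sh two = suffFull two sh 0 := by
        have h0 := pairsOf_suffFull two sh htwodesc 0
        rwa [List.drop_zero] at h0
      -- length bound for A's indexing loop
      have hlen6 : k ≤ (((sortA ((sortA (pairsOf sh two)).take K ++ one)).length : Nat) : Int) := by
        have hs1 : (sortA ((sortA (pairsOf sh two)).take K ++ one)).length
            = min K (sortA (pairsOf sh two)).length + one.length := by
          unfold sortA
          rw [PySem.List.length_sorted, List.length_append, List.length_take]
        have h1 : one.length = M.countP (fun m => decide (sh ≤ m)) := by
          rw [hone]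
          exact (List.countP_eq_length_filter).symm
        have h2 : (sortA (pairsOf sh two)).length
            = (PySem.List.combinations two 2).countP (fun c => decide (sh ≤ c.sum)) := by
          rw [← pairs_combinations sh two, cond_on_combinations]
          unfold sortA
          rw [PySem.List.length_sorted, List.length_map, ← List.countP_eq_length_filter]
        rcases hdisj with h | h | h
        · omega
        · exfalso
          apply hc
          rw [PySem.List.slice_to _ (by norm_num : (0:Int) ≤ 3)]
          simpa using h
        · rw [hs1]
          push_cast
          omega
      rw [sum_loop _ k hk0' hlen6, ← hK]
      rw [takeSort_trunc K (pairsOf sh two) one, hP0, master two sh k hk0' htwodesc 0 one,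
        ← takeSort_trunc K (suffT two sh k 0) one]

-- ===== VERDICT (by name: the statement is the Claim_ definition above) =====
theorem solution_spec : Claim_equal_solution := by
  intro enem mis _ hpre
  unfold Spec_solution
  exact main_eq enem mis hpre
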